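-- pv_equiv track=rewrite | github.com/wanawin/better-grid | pick3_touch_grid_app_v15_seedgrid_straights.py | compute_pos_followers
-- ===== SOURCE A (Python) =====
-- from collections import defaultdict
--
-- def compute_pos_followers(stream_nums: list[str], upto_exclusive: int, lookback: int | None) -> list[dict[str, dict[str, int]]]:
--     """counts[pos][prev_digit][next_digit] = count
--
--     Uses transitions fully contained in [start, upto_exclusive).
--     """
--     counts = [defaultdict(lambda: defaultdict(int)) for _ in range(3)]
--     if upto_exclusive <= 1:
--         return counts
--
--     end = int(upto_exclusive)
--     start = 1
--     if lookback is not None: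
--         start = max(1, end - int(lookback))
--
--     for i in range(start, end):
--         prev = str(stream_nums[i - 1]).zfill(3)
--         nxt = str(stream_nums[i]).zfill(3)
--         for pos in range(3):
--             a = prev[pos]
--             b = nxt[pos]
--             counts[pos][a][b] += 1
--
--     return counts
-- ===== SOURCE B (Python) =====
-- from collections import defaultdict
--
-- def compute_pos_followers(stream_nums: list[str], upto_exclusive: int, lookback: int | None) -> list[dict[str, dict[str, int]]]:
--     """Dedup-and-count instead of incremental counting: enumerate each position's
--     distinct transition keys in first-occurrence order, then count occurrences
--     of each key directly with list.count."""
--     counts = [defaultdict(lambda: defaultdict(int)) for _ in range(3)]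
--     if upto_exclusive <= 1:
--         return counts
--     end = int(upto_exclusive)
--     start = 1 if lookback is None else max(1, end - int(lookback))
--     if start >= end:
--         return counts
--     padded = [str(stream_nums[j]).zfill(3) for j in range(start - 1, end)]
--     for pos in range(3):
--         pairs = [(w[pos], x[pos]) for w, x in zip(padded, padded[1:])]
--         d = counts[pos]
--         for a in dict.fromkeys(p[0] for p in pairs):
--             followers = [p[1] for p in pairs if p[0] == a]
--             inner = d[a]
--             for b in dict.fromkeys(followers):
--                 inner[b] = followers.count(b)
--     return counts
-- ===== Notes on version B (the rewrite author's own statement) =====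
-- stated objective: alternative
-- what changed: B replaces A's incremental counting (one pass bumping nested defaultdict counters per transition) with dedup-and-count: per position it lists the transition pairs once, enumerates the distinct prev-digits and their distinct followers in first-occurrence order via dict.fromkeys, and fills each count directly with list.count.
import Mathlib
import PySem

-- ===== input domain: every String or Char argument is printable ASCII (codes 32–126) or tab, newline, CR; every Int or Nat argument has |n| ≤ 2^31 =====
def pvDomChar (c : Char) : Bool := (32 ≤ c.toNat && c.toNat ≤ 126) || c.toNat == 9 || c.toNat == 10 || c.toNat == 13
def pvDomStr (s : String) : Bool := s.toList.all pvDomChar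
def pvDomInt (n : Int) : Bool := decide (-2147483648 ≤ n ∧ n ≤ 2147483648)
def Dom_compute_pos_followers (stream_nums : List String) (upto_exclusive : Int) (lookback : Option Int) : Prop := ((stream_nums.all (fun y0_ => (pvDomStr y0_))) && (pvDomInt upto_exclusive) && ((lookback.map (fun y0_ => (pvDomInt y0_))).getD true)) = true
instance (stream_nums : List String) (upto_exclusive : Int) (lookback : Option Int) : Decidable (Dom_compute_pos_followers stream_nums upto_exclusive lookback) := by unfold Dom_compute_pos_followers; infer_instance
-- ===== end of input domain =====

-- B counts by dedup-and-count (distinct transition keys in first-occurrence order, then list.count) instead of A's incremental nested-counter updates; same cost class.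


-- shared boundary computation (start = 1, or max(1, end - lookback)) and dict rendering
def pvStart (e : Int) (lookback : Option Int) : Int :=
  match lookback with
  | none => 1
  | some lb => max 1 (e - lb)

def pvItems2 (d : PySem.Dict String (PySem.Dict String Int)) : List (String × List (String × Int)) :=
  d.items.map (fun p => (p.1, p.2.items))

-- ===== PORT A =====
def compute_pos_followers (stream_nums : List String) (upto_exclusive : Int) (lookback : Option Int) : List (List (String × List (String × Int))) :=
  if upto_exclusive ≤ 1 then
    ([PySem.Dict.empty, PySem.Dict.empty, PySem.Dict.empty] :
      List (PySem.Dict String (PySem.Dict String Int))).map pvItems2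
  else
    (((PySem.List.pyRange (pvStart upto_exclusive lookback) upto_exclusive 1).foldl
      (fun cs i =>
        let prev := PySem.Chars.zfill (PySem.List.pyGetD stream_nums (i - 1) "").toList 3
        let nxt := PySem.Chars.zfill (PySem.List.pyGetD stream_nums i "").toList 3
        ([0, 1, 2] : List Nat).foldl
          (fun cs pos =>
            let a := String.ofList [prev.getD pos ' ']
            let b := String.ofList [nxt.getD pos ' ']
            cs.modify pos (fun d =>
              d.modify a PySem.Dict.empty (fun inner => inner.modify b 0 (· + 1))))
          cs)
      ([PySem.Dict.empty, PySem.Dict.empty, PySem.Dict.empty] :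
        List (PySem.Dict String (PySem.Dict String Int)))).map pvItems2)

-- ===== PORT B =====
def compute_pos_followers_alt (stream_nums : List String) (upto_exclusive : Int) (lookback : Option Int) : List (List (String × List (String × Int))) :=
  if upto_exclusive ≤ 1 then [[], [], []]
  else if pvStart upto_exclusive lookback ≥ upto_exclusive then [[], [], []]
  else
    let padded := (PySem.List.pyRange (pvStart upto_exclusive lookback - 1) upto_exclusive 1).map
      (fun j => PySem.Chars.zfill (PySem.List.pyGetD stream_nums j "").toList 3)
    ([0, 1, 2] : List Nat).map (fun pos =>
      let pairs := (padded.zip (padded.drop 1)).map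
        (fun wx => (String.ofList [wx.1.getD pos ' '], String.ofList [wx.2.getD pos ' ']))
      pvItems2 ((PySem.List.dedup (pairs.map (·.1))).foldl
        (fun d a =>
          let followers := (pairs.filter (fun p => p.1 == a)).map (·.2)
          d.insert a ((PySem.List.dedup followers).foldl
            (fun inner b => inner.insert b ((followers.count b : Int))) PySem.Dict.empty))
        PySem.Dict.empty))

-- ===== PRECONDITION & SPEC =====
-- Pre_ excludes exactly the inputs where Python A raises IndexError: a nonempty window
-- (upto_exclusive > 1 and start < upto_exclusive) reaching past the end of stream_nums.
def Pre_compute_pos_followers (stream_nums : List String) (upto_exclusive : Int) (lookback : Option Int) : Prop :=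
  (decide (upto_exclusive ≤ 1) || decide (upto_exclusive ≤ (stream_nums.length : Int)) ||
    (match lookback with
     | none => false
     | some lb => decide (upto_exclusive ≤ max 1 (upto_exclusive - lb)))) = true
instance (stream_nums : List String) (upto_exclusive : Int) (lookback : Option Int) : Decidable (Pre_compute_pos_followers stream_nums upto_exclusive lookback) := by unfold Pre_compute_pos_followers; infer_instance

def pvWitness_compute_pos_followers : List String × Int × Option Int := (["007", "123"], 2, none)

def Spec_compute_pos_followers (stream_nums : List String) (upto_exclusive : Int) (lookback : Option Int) (out : List (List (String × List (String × Int)))) : Prop := out = compute_pos_followers_alt stream_nums upto_exclusive lookback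
instance (stream_nums : List String) (upto_exclusive : Int) (lookback : Option Int) (out : List (List (String × List (String × Int)))) : Decidable (Spec_compute_pos_followers stream_nums upto_exclusive lookback out) := by unfold Spec_compute_pos_followers; infer_instance

-- ===== CLAIM (what is proved, stated in full; the proofs are below) =====
def Claim_equal_compute_pos_followers : Prop := ∀ (stream_nums : List String) (upto_exclusive : Int) (lookback : Option Int), Dom_compute_pos_followers stream_nums upto_exclusive lookback → Pre_compute_pos_followers stream_nums upto_exclusive lookback → Spec_compute_pos_followers stream_nums upto_exclusive lookback (compute_pos_followers stream_nums upto_exclusive lookback)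

-- ===== LEMMAS AND PROOFS =====

-- A's per-transition update touches the 3 components of the list independently:
-- the whole fold splits into three componentwise folds.
lemma fold3 {α : Type} (F : Int → Nat → α → α) :
    ∀ (l : List Int) (c0 c1 c2 : α),
      l.foldl (fun cs i => ([0, 1, 2] : List Nat).foldl (fun cs pos => cs.modify pos (F i pos)) cs) [c0, c1, c2]
        = [l.foldl (fun c i => F i 0 c) c0, l.foldl (fun c i => F i 1 c) c1,
           l.foldl (fun c i => F i 2 c) c2]
  | [], _, _, _ => rfl
  | i :: t, c0, c1, c2 => by
      simp only [List.foldl_cons, List.foldl_nil]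
      exact fold3 F t (F i 0 c0) (F i 1 c1) (F i 2 c2)

-- zip(seq, seq[1:]) over indices a..e-1 is the list of (w (i-1), w i) for i in a+1..e-1.
lemma zipc {α : Type} (w : Int → α) :
    ∀ (n : Nat) (a e : Int), a < e → (e - a).toNat ≤ n →
      (((PySem.List.pyRange a e 1).map w).zip (((PySem.List.pyRange a e 1).map w).drop 1))
        = (PySem.List.pyRange (a + 1) e 1).map (fun i => (w (i - 1), w i)) := by
  intro n
  induction n with
  | zero => intro a e h hn; omega
  | succ n ih =>
      intro a e h hn
      rcases eq_or_lt_of_le (by omega : a + 1 ≤ e) with he | he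
      · subst he
        rw [PySem.List.pyRange_one_singleton]
        simp [PySem.List.pyRange_one_eq_nil (le_refl (a + 1))]
      · rw [PySem.List.pyRange_one_cons h, PySem.List.pyRange_one_cons he]
        simp only [List.map_cons, List.drop_succ_cons, List.drop_zero, List.zip_cons_cons]
        have ht := ih (a + 1) e he (by omega)
        rw [PySem.List.pyRange_one_cons he] at ht
        simp only [List.map_cons, List.drop_succ_cons, List.drop_zero] at ht
        rw [ht]
        simp

-- a fold of 'modify (key x)' updates, read back at one key a, is the fold of the
-- updates of the entries with key a, over the old value at a
lemma getD_modify_group {κ ν β : Type} [BEq κ] [LawfulBEq κ] (key : β → κ) (d0 : ν)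
    (f : β → ν → ν) (a : κ) :
    ∀ (L : List β) (d : PySem.Dict κ ν),
      (L.foldl (fun d x => d.modify (key x) d0 (f x)) d).getD a d0
        = (L.filter (fun x => key x == a)).foldl (fun v x => f x v) (d.getD a d0)
  | [], _ => rfl
  | x :: t, d => by
      simp only [List.foldl_cons, List.filter_cons]
      by_cases h : key x = a
      · subst h
        simp only [beq_self_eq_true, if_true, List.foldl_cons]
        rw [getD_modify_group key d0 f (key x) t _, PySem.Dict.getD_modify_self]
      · have hb : (key x == a) = false := by simp [h]
        rw [hb, if_neg (by simp)]
        rw [getD_modify_group key d0 f a t _, PySem.Dict.getD_modify_of_ne _ _ _ (Ne.symm h)]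

-- ===== VERDICT (by name: the statement is the Claim_ definition above) =====
theorem compute_pos_followers_spec : Claim_equal_compute_pos_followers := by
  intro s u lb _ _
  unfold Spec_compute_pos_followers compute_pos_followers compute_pos_followers_alt
  by_cases hu : u ≤ 1
  · simp only [if_pos hu]; rfl
  · simp only [if_neg hu]
    by_cases hs : pvStart u lb ≥ u
    · rw [if_pos hs, PySem.List.pyRange_one_eq_nil hs]; rfl
    · rw [if_neg hs]
      have hs2 : pvStart u lb < u := by omega
      rw [fold3]
      -- the per-position digit function and the per-position pair list
      set w : Int → List Char := fun j => PySem.Chars.zfill (PySem.List.pyGetD s j "").toList 3 with hw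
      have hzip := zipc w ((u - (pvStart u lb - 1)).toNat) (pvStart u lb - 1) u (by omega) (le_refl _)
      have h1 : pvStart u lb - 1 + 1 = pvStart u lb := by omega
      rw [h1] at hzip
      have key : ∀ pos : Nat,
          pvItems2 ((PySem.List.pyRange (pvStart u lb) u 1).foldl
            (fun d i =>
              d.modify (String.ofList [(w (i - 1)).getD pos ' ']) PySem.Dict.empty
                (fun inner =>
                  inner.modify (String.ofList [(w i).getD pos ' ']) (0 : Int) (· + 1)))
            PySem.Dict.empty)
          = (let pairs := ((((PySem.List.pyRange (pvStart u lb - 1) u 1).map w).zip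
                (((PySem.List.pyRange (pvStart u lb - 1) u 1).map w).drop 1)).map
                  (fun wx => (String.ofList [wx.1.getD pos ' '], String.ofList [wx.2.getD pos ' '])));
             pvItems2 ((PySem.List.dedup (pairs.map (·.1))).foldl
              (fun d a =>
                let followers := (pairs.filter (fun p => p.1 == a)).map (·.2)
                d.insert a ((PySem.List.dedup followers).foldl
                  (fun inner b => inner.insert b ((followers.count b : Int))) PySem.Dict.empty))
              PySem.Dict.empty)) := by
        intro pos
        simp only [hzip]
        set L : List (String × String) := (PySem.List.pyRange (pvStart u lb) u 1).map
          (fun i => (String.ofList [(w (i - 1)).getD pos ' '], String.ofList [(w i).getD pos ' '])) with hL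
        have hP : List.map (fun wx => (String.ofList [wx.1.getD pos ' '], String.ofList [wx.2.getD pos ' ']))
            (List.map (fun i => (w (i - 1), w i)) (PySem.List.pyRange (pvStart u lb) u 1)) = L := by
          rw [List.map_map]; exact List.map_congr_left (fun i _ => rfl)
        rw [hP]
        -- A's fold over the range is the fold over the pair list L
        have hA : (PySem.List.pyRange (pvStart u lb) u 1).foldl
            (fun d i =>
              d.modify (String.ofList [(w (i - 1)).getD pos ' ']) PySem.Dict.empty
                (fun inner =>
                  inner.modify (String.ofList [(w i).getD pos ' ']) (0 : Int) (· + 1)))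
            PySem.Dict.empty
            = L.foldl (fun d p => d.modify p.1 PySem.Dict.empty
                (fun inner => inner.modify p.2 (0 : Int) (· + 1))) PySem.Dict.empty := by
          rw [hL, List.foldl_map]
        rw [hA]
        -- keys of A's fold, in order, are the deduped first components
        have hkeys : (L.foldl (fun d p => d.modify p.1 PySem.Dict.empty
              (fun inner => inner.modify p.2 (0 : Int) (· + 1))) PySem.Dict.empty).keys
            = PySem.List.dedup (L.map (·.1)) := by
          have := PySem.Dict.keys_foldl_modify_key L (fun p => p.1) PySem.Dict.empty
            (fun _ p inner => inner.modify p.2 (0 : Int) (· + 1)) PySem.Dict.empty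
          simpa using this
        have hnd : (L.foldl (fun d p => d.modify p.1 PySem.Dict.empty
              (fun inner => inner.modify p.2 (0 : Int) (· + 1))) PySem.Dict.empty).keys.Nodup := by
          exact PySem.Dict.nodup_keys_foldl_modify_key L (fun p => p.1) PySem.Dict.empty
            (fun _ p inner => inner.modify p.2 (0 : Int) (· + 1)) PySem.Dict.empty (by simp)
        -- A's items, rendered
        unfold pvItems2
        rw [PySem.Dict.items_eq_map_keys _ hnd PySem.Dict.empty, hkeys]
        -- B's items: both folds insert only fresh keys
        have hBout : ((PySem.List.dedup (L.map (·.1))).foldl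
            (fun d a =>
              let followers := (L.filter (fun p => p.1 == a)).map (·.2)
              d.insert a ((PySem.List.dedup followers).foldl
                (fun inner b => inner.insert b ((followers.count b : Int))) PySem.Dict.empty))
            PySem.Dict.empty).items
            = (PySem.List.dedup (L.map (·.1))).map (fun a => (a,
                (let followers := (L.filter (fun p => p.1 == a)).map (·.2);
                 (PySem.List.dedup followers).foldl
                  (fun inner b => inner.insert b ((followers.count b : Int))) PySem.Dict.empty))) := by
          have := PySem.Dict.items_foldl_insert_fresh (PySem.List.dedup (L.map (·.1)))
            (fun a => a)
            (fun a => (let followers := (L.filter (fun p => p.1 == a)).map (·.2);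
               (PySem.List.dedup followers).foldl
                (fun inner b => inner.insert b ((followers.count b : Int))) PySem.Dict.empty))
            PySem.Dict.empty (by intro a _; simp) (by simp [PySem.Set.nodup_ofList (L.map (·.1))])
          simpa using this
        rw [hBout]
        refine congrArg (List.map (fun p : String × PySem.Dict String Int => (p.1, p.2.items))) (List.map_congr_left ?_)
        intro a _
        refine congrArg (Prod.mk a) (PySem.Dict.ext ?_)
        -- per outer key a: A's inner dict is the counter of the followers of a
        have hinner : (L.foldl (fun d p => d.modify p.1 PySem.Dict.empty
              (fun inner => inner.modify p.2 (0 : Int) (· + 1))) PySem.Dict.empty).getD a PySem.Dict.empty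
            = PySem.Dict.counter ((L.filter (fun p => p.1 == a)).map (·.2)) := by
          rw [getD_modify_group (fun p : String × String => p.1) PySem.Dict.empty
            (fun p inner => inner.modify p.2 (0 : Int) (· + 1)) a L PySem.Dict.empty]
          rw [PySem.Dict.counter_eq_foldl, List.foldl_map]
          simp [PySem.Dict.getD_empty]
        rw [hinner, PySem.Dict.items_counter]
        -- B's inner dict: fresh inserts over the deduped followers, values = counts
        have := PySem.Dict.items_foldl_insert_fresh
          (PySem.List.dedup ((L.filter (fun p => p.1 == a)).map (·.2)))
          (fun b => b)
          (fun b => (((L.filter (fun p => p.1 == a)).map (·.2)).count b : Int))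
          PySem.Dict.empty (by intro b _; simp)
          (by simp [PySem.Set.nodup_ofList ((L.filter (fun p => p.1 == a)).map (·.2))])
        rw [this]
        rfl
      simp only [List.map]
      exact congrArg₂ List.cons (key 0)
        (congrArg₂ List.cons (key 1) (congrArg₂ List.cons (key 2) rfl))
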